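-- pv_equiv track=rewrite | github.com/cbonnalie/Advent2025 | day6/part1.py | orient_equations
-- ===== SOURCE A (Python) =====
-- def orient_equations(input_text, num_lengths):
--     equations = []
--     start = 0
--     for length in num_lengths:
--         chunk = []
--         for i in range(len(input_text)):
--             chunk.append(input_text[i][start:start + length])
--         start += length + 1
--         equations.append(chunk)
--     return equations
-- ===== SOURCE B (Python) =====
-- def orient_equations(input_text, num_lengths):
--     if not input_text:
--         return [[] for _ in num_lengths]
--     per_row = []
--     for row in input_text:
--         start = 0
--         chunks = []
--         for length in num_lengths:
--             chunks.append(row[start:start + length])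
--             start += length + 1
--         per_row.append(chunks)
--     return [list(col) for col in zip(*per_row)]
-- ===== Notes on version B (the rewrite author's own statement) =====
-- stated objective: alternative
-- what changed: B inverts the loop nesting: it builds each row's chunk list row-major with a running offset and then transposes with zip(*per_row), instead of A's column-major direct slicing; same O(n*m) cost.
import Mathlib
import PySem

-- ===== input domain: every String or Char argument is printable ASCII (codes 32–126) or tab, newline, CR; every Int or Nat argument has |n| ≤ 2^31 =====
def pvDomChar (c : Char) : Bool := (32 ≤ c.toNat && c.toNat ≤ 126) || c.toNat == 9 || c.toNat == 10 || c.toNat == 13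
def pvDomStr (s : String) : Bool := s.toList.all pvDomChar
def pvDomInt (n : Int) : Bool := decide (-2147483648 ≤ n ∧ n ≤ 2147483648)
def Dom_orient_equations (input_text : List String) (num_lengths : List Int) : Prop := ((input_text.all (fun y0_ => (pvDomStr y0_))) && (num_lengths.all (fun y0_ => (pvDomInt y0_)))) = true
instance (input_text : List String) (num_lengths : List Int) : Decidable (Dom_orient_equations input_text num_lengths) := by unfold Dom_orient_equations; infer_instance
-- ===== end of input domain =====

-- B inverts the loop nesting (row-major chunking then a zip(*…) transpose) instead of A's
-- column-major direct slicing; return values are proved identical (objective: alternative).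

-- ===== PORT A =====
-- A: outer loop over num_lengths, inner loop over the rows, slicing row[start:start+length].
def orient_equations (input_text : List String) (num_lengths : List Int) : List (List String) :=
  (num_lengths.foldl
    (fun (acc : List (List String) × Int) length =>
      let chunk := input_text.foldl
        (fun ch row => ch ++ [PySem.Str.slice row (some acc.2) (some (acc.2 + length))]) []
      (acc.1 ++ [chunk], acc.2 + length + 1))
    ([], 0)).1

-- ===== PORT B =====
-- zip(*rows): take heads of all rows, recurse on tails, stop when any row is exhausted.
def pyZipStar (rows : List (List String)) : List (List String) :=
  if h : rows = [] ∨ rows.any (fun r => r.isEmpty) then []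
  else (rows.map (fun r => r.headI)) :: pyZipStar (rows.map List.tail)
termination_by (rows.headI).length
decreasing_by
  match rows with
  | [] => exact absurd rfl (fun hh => h (Or.inl hh))
  | r :: rs =>
    have hr : r ≠ [] := by
      intro hre
      exact h (Or.inr (by simp [hre]))
    have hp : 0 < r.length := List.length_pos_of_ne_nil hr
    simp [List.headI, List.length_tail]
    omega

def orient_equations_alt (input_text : List String) (num_lengths : List Int) : List (List String) :=
  if input_text = [] then num_lengths.map (fun _ => [])
  else
    let per_row := input_text.map (fun row =>
      (num_lengths.foldl
        (fun (acc : List String × Int) length =>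
          (acc.1 ++ [PySem.Str.slice row (some acc.2) (some (acc.2 + length))], acc.2 + length + 1))
        ([], 0)).1)
    pyZipStar per_row

-- ===== PRECONDITION & SPEC =====
def Spec_orient_equations (input_text : List String) (num_lengths : List Int) (out : List (List String)) : Prop := out = orient_equations_alt input_text num_lengths
instance (input_text : List String) (num_lengths : List Int) (out : List (List String)) : Decidable (Spec_orient_equations input_text num_lengths out) := by unfold Spec_orient_equations; infer_instance

-- ===== CLAIM (what is proved, stated in full; the proofs are below) =====
def Claim_equal_orient_equations : Prop := ∀ (input_text : List String) (num_lengths : List Int), Dom_orient_equations input_text num_lengths → Spec_orient_equations input_text num_lengths (orient_equations input_text num_lengths)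

-- ===== LEMMAS AND PROOFS =====

-- canonical column-major result, with explicit running start
def pvCols (xs : List String) : List Int → Int → List (List String)
  | [], _ => []
  | l :: ls, s =>
    (xs.map (fun row => PySem.Str.slice row (some s) (some (s + l)))) :: pvCols xs ls (s + l + 1)

-- canonical per-row chunk list
def pvRowc (row : String) : List Int → Int → List String
  | [], _ => []
  | l :: ls, s => PySem.Str.slice row (some s) (some (s + l)) :: pvRowc row ls (s + l + 1)

theorem pvInnerFold (xs : List String) (f : String → String) (acc : List String) :
    xs.foldl (fun ch row => ch ++ [f row]) acc = acc ++ xs.map f := by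
  induction xs generalizing acc with
  | nil => simp
  | cons x xs ih => simp [List.foldl, ih, List.append_assoc]

theorem pvAFold (xs : List String) (ls : List Int) (acc : List (List String)) (s : Int) :
    (ls.foldl
      (fun (acc : List (List String) × Int) length =>
        (acc.1 ++ [xs.foldl
          (fun ch row => ch ++ [PySem.Str.slice row (some acc.2) (some (acc.2 + length))]) []],
         acc.2 + length + 1))
      (acc, s)).1 = acc ++ pvCols xs ls s := by
  induction ls generalizing acc s with
  | nil => simp [pvCols]
  | cons l ls ih =>
    simp only [List.foldl_cons]
    rw [ih, pvInnerFold]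
    simp [pvCols]

theorem pvA_eq (xs : List String) (ls : List Int) :
    orient_equations xs ls = pvCols xs ls 0 := by
  unfold orient_equations
  have := pvAFold xs ls [] 0
  simpa using this

theorem pvBFold (row : String) (ls : List Int) (acc : List String) (s : Int) :
    (ls.foldl
      (fun (acc : List String × Int) length =>
        (acc.1 ++ [PySem.Str.slice row (some acc.2) (some (acc.2 + length))], acc.2 + length + 1))
      (acc, s)).1 = acc ++ pvRowc row ls s := by
  induction ls generalizing acc s with
  | nil => simp [pvRowc]
  | cons l ls ih => simp [List.foldl, ih, pvRowc, List.append_assoc]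

theorem pvZip_eq (xs : List String) (ls : List Int) (s : Int) (hx : xs ≠ []) :
    pyZipStar (xs.map (fun row => pvRowc row ls s)) = pvCols xs ls s := by
  induction ls generalizing s with
  | nil =>
    rw [pyZipStar]
    have : (xs.map (fun row => pvRowc row [] s)) = [] ∨
        (xs.map (fun row => pvRowc row [] s)).any (fun r => r.isEmpty) := by
      right
      match xs with
      | [] => exact absurd rfl hx
      | x :: xs => simp [pvRowc]
    rw [dif_pos this]
    simp [pvCols]
  | cons l ls ih =>
    rw [pyZipStar]
    have hne : ¬ ((xs.map (fun row => pvRowc row (l :: ls) s)) = [] ∨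
        (xs.map (fun row => pvRowc row (l :: ls) s)).any (fun r => r.isEmpty)) := by
      push Not
      constructor
      · simp [hx]
      · simp [pvRowc]
    rw [dif_neg hne]
    simp only [pvCols]
    congr 1
    · simp [pvRowc, List.map_map, Function.comp]
    · have : (xs.map (fun row => pvRowc row (l :: ls) s)).map List.tail
          = xs.map (fun row => pvRowc row ls (s + l + 1)) := by
        simp [pvRowc, List.map_map, Function.comp]
      rw [this, ih]

theorem pvEmpty (ls : List Int) (s : Int) :
    pvCols ([] : List String) ls s = ls.map (fun _ => []) := by
  induction ls generalizing s with
  | nil => simp [pvCols]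
  | cons l ls ih => simp [pvCols, ih]

-- ===== VERDICT (by name: the statement is the Claim_ definition above) =====
theorem orient_equations_spec : Claim_equal_orient_equations := by
  intro xs ls _
  unfold Spec_orient_equations orient_equations_alt
  rw [pvA_eq]
  by_cases hx : xs = []
  · subst hx; simp [pvEmpty]
  · rw [if_neg hx]
    have hpr : xs.map (fun row =>
        (ls.foldl
          (fun (acc : List String × Int) length =>
            (acc.1 ++ [PySem.Str.slice row (some acc.2) (some (acc.2 + length))], acc.2 + length + 1))
          ([], 0)).1) = xs.map (fun row => pvRowc row ls 0) := by
      apply List.map_congr_left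
      intro row _
      simpa using pvBFold row ls [] 0
    rw [hpr, pvZip_eq xs ls 0 hx]
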